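-- pv_equiv track=rewrite | github.com/elfilaoussama/slm-data-pipeline | scripts/normalize_dedup.py | _normalize_python
-- ===== SOURCE A (Python) =====
-- def _normalize_python(code: str) -> str:
--     # Minimal normalization: strip trailing spaces and trim blank lines
--     lines = [ln.rstrip() for ln in code.splitlines()]
--     # Collapse multiple blank lines
--     out = []
--     blank = 0
--     for ln in lines:
--         if ln.strip() == '':
--             blank += 1
--             if blank > 1:
--                 continue
--         else:
--             blank = 0
--         out.append(ln)
--     norm = '\n'.join(out).strip() + '\n'
--     return norm
-- ===== SOURCE B (Python) =====
-- def _normalize_python(code: str) -> str: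
--     # Run-based rewrite: scan runs of blank / non-blank lines with index pointers,
--     # emitting one empty line per blank run and whole non-blank runs via slices.
--     lines = [ln.rstrip() for ln in code.splitlines()]
--     out = []
--     i = 0
--     n = len(lines)
--     while i < n:
--         if lines[i] == '':
--             out.append('')
--             while i < n and lines[i] == '':
--                 i += 1
--         else:
--             j = i
--             while j < n and lines[j] != '':
--                 j += 1
--             out.extend(lines[i:j])
--             i = j
--     return '\n'.join(out).strip() + '\n'
-- ===== Notes on version B (the rewrite author's own statement) =====
-- stated objective: alternative
-- what changed: A's stateful blank-counter loop with continue is replaced by an index-based run scan: one pass of two inner pointer loops that emit a single empty line per blank run and copy each non-blank run with a slice.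
import Mathlib
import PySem

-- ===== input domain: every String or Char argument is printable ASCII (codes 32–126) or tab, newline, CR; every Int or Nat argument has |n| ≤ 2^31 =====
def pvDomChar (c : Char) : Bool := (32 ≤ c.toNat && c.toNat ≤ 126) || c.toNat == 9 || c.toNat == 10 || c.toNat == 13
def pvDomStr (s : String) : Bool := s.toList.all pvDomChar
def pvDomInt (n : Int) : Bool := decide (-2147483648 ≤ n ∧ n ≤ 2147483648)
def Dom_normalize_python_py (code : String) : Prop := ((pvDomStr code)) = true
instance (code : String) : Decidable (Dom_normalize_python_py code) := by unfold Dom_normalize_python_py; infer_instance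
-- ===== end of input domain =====

-- B replaces A's running blank-counter loop by an index-based run scan (one '' per blank
-- run, non-blank runs copied by slice); objective: alternative decomposition, same cost.

-- ===== PORT A =====
def normalize_python_py (code : String) : String :=
  let lines := (PySem.Str.splitlines code).map (fun ln => PySem.Str.rstrip ln)
  let res := lines.foldl (fun (acc : List String × Int) ln =>
      if PySem.Str.strip ln == "" then
        let blank := acc.2 + 1
        if blank > 1 then (acc.1, blank) else (acc.1 ++ [ln], blank)
      else (acc.1 ++ [ln], 0)) ([], 0)
  PySem.Str.strip (PySem.Str.join "\n" res.1) ++ "\n"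

-- ===== PORT B =====
-- inner 'while i < n and lines[i] == "": i += 1'
def altSkipBlank (lines : List String) (i : Nat) : Nat :=
  if h : i < lines.length then
    if lines[i] == "" then altSkipBlank lines (i + 1) else i
  else i
termination_by lines.length - i

-- inner 'while j < n and lines[j] != "": j += 1'
def altSkipNonblank (lines : List String) (i : Nat) : Nat :=
  if h : i < lines.length then
    if lines[i] != "" then altSkipNonblank lines (i + 1) else i
  else i
termination_by lines.length - i

theorem le_altSkipBlank (lines : List String) (i : Nat) : i ≤ altSkipBlank lines i := by
  unfold altSkipBlank
  split
  · split
    · exact le_trans (Nat.le_succ i) (le_altSkipBlank lines (i + 1))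
    · exact le_refl i
  · exact le_refl i
termination_by lines.length - i

theorem le_altSkipNonblank (lines : List String) (i : Nat) : i ≤ altSkipNonblank lines i := by
  unfold altSkipNonblank
  split
  · split
    · exact le_trans (Nat.le_succ i) (le_altSkipNonblank lines (i + 1))
    · exact le_refl i
  · exact le_refl i
termination_by lines.length - i

-- outer 'while i < n' loop of B
def altLoop (lines : List String) (i : Nat) : List String :=
  if h : i < lines.length then
    if hb : lines[i] == "" then
      have : i < altSkipBlank lines (i + 1) := lt_of_lt_of_le (Nat.lt_succ_self i) (le_altSkipBlank lines (i + 1))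
      "" :: altLoop lines (altSkipBlank lines (i + 1))
    else
      let j := altSkipNonblank lines i
      have hj : i < j := by
        show i < altSkipNonblank lines i
        rw [altSkipNonblank]
        simp only [h, dif_pos, bne, hb, Bool.not_false, if_true]
        exact lt_of_lt_of_le (Nat.lt_succ_self i) (le_altSkipNonblank lines (i + 1))
      PySem.List.slice lines (some (i : Int)) (some (j : Int)) ++ altLoop lines j
  else []
termination_by lines.length - i
decreasing_by
  · omega
  · omega

def normalize_python_py_alt (code : String) : String :=
  let lines := (PySem.Str.splitlines code).map (fun ln => PySem.Str.rstrip ln)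
  let out := altLoop lines 0
  PySem.Str.strip (PySem.Str.join "\n" out) ++ "\n"

-- ===== PRECONDITION & SPEC =====
def Spec_normalize_python_py (code : String) (out : String) : Prop := out = normalize_python_py_alt code
instance (code : String) (out : String) : Decidable (Spec_normalize_python_py code out) := by unfold Spec_normalize_python_py; infer_instance

-- ===== CLAIM (what is proved, stated in full; the proofs are below) =====
def Claim_equal_normalize_python_py : Prop := ∀ (code : String), Dom_normalize_python_py code → Spec_normalize_python_py code (normalize_python_py code)

-- ===== LEMMAS AND PROOFS =====

-- structural form of A's loop: keep a blank line only if the previous kept context was not blank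
def collapseA : List String → Bool → List String
  | [], _ => []
  | ln :: rest, prev =>
    if ln == "" then (if prev then [] else [ln]) ++ collapseA rest true
    else ln :: collapseA rest false

-- dropWhile is "drop the takeWhile prefix" (used to line B's index skips up with runs)
theorem dropWhile_eq_drop {α : Type} (p : α → Bool) (l : List α) :
    l.dropWhile p = l.drop (l.takeWhile p).length := by
  induction l with
  | nil => simp
  | cons x xs ih => by_cases h : p x <;> simp [h, ih]

theorem rstrip_eq_nil_iff (cs : List Char) :
    PySem.Chars.rstrip cs = [] ↔ ∀ c ∈ cs, PySem.Chars.isspace c := by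
  simp [PySem.Chars.rstrip, List.dropWhile_eq_nil_iff]

theorem chars_strip_rstrip (cs : List Char)
    (h : PySem.Chars.strip (PySem.Chars.rstrip cs) = []) : PySem.Chars.rstrip cs = [] := by
  set x := PySem.Chars.rstrip cs with hx
  have hall : ∀ c ∈ x, PySem.Chars.isspace c := by
    intro c hc
    have hsplit := List.takeWhile_append_dropWhile (p := PySem.Chars.isspace) (l := x)
    rw [← hsplit] at hc
    rcases List.mem_append.mp hc with h1 | h2
    · exact List.mem_takeWhile_imp h1
    · have hx2 : ∀ c ∈ List.dropWhile PySem.Chars.isspace x, PySem.Chars.isspace c := by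
        have := (rstrip_eq_nil_iff (PySem.Chars.lstrip x)).mp h
        simpa [PySem.Chars.lstrip] using this
      exact hx2 c h2
  by_contra hne
  have hd : List.dropWhile PySem.Chars.isspace cs.reverse ≠ [] := by
    intro h0
    exact hne (by simp [hx, PySem.Chars.rstrip, h0])
  have hhead := List.head_dropWhile_not PySem.Chars.isspace hd
  have hmem : (List.dropWhile PySem.Chars.isspace cs.reverse).head hd ∈ x := by
    rw [hx]
    unfold PySem.Chars.rstrip
    rw [List.mem_reverse]
    exact List.head_mem hd
  rw [hall _ hmem] at hhead
  simp at hhead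

-- after rstrip, 'ln.strip() == ""' is 'ln == ""'
theorem strip_rstrip_blank (s : String) :
    (PySem.Str.strip (PySem.Str.rstrip s) == "") = (PySem.Str.rstrip s == "") := by
  by_cases hy : PySem.Str.rstrip s = ""
  · rw [hy]; rfl
  · have h1 : PySem.Str.strip (PySem.Str.rstrip s) ≠ "" := by
      intro h0
      apply hy
      have h2 : (PySem.Str.rstrip s).toList = [] := by
        have hc : PySem.Chars.strip ((PySem.Str.rstrip s).toList) = [] := by
          rw [← PySem.Str.toList_strip, h0]; rfl
        have h3 : (PySem.Str.rstrip s).toList = PySem.Chars.rstrip s.toList := PySem.Str.toList_rstrip s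
        rw [h3] at hc ⊢
        exact chars_strip_rstrip _ hc
      exact String.toList_eq_nil_iff.mp h2
    simp [h1, hy]

-- A's foldl computes collapseA (given the blank tests agree elementwise)
theorem foldA_eq_collapseA (ls : List String) (out : List String) (blank : Int)
    (h0 : 0 ≤ blank)
    (hP : ∀ s ∈ ls, (PySem.Str.strip s == "") = (s == "")) :
    (ls.foldl (fun (acc : List String × Int) ln =>
      if PySem.Str.strip ln == "" then
        let blank := acc.2 + 1
        if blank > 1 then (acc.1, blank) else (acc.1 ++ [ln], blank)
      else (acc.1 ++ [ln], 0)) (out, blank)).1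
    = out ++ collapseA ls (decide (1 ≤ blank)) := by
  induction ls generalizing out blank with
  | nil => simp [collapseA]
  | cons ln rest ih =>
    have hln := hP ln (List.mem_cons_self ..)
    have hrest : ∀ s ∈ rest, (PySem.Str.strip s == "") = (s == "") :=
      fun s hs => hP s (List.mem_cons_of_mem _ hs)
    by_cases hb : ln == ""
    · rw [List.foldl_cons]
      simp only [hln, hb, if_pos]
      by_cases h1 : (1 : Int) ≤ blank
      · have hgt : blank + 1 > 1 := by omega
        rw [if_pos hgt, ih _ _ (by omega) hrest]
        have hd1 : decide (1 ≤ blank) = true := by simp [h1]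
        have hd2 : decide (1 ≤ blank + 1) = true := by simp; omega
        simp [collapseA, hb, hd1, h0]
      · have hgt : ¬ (blank + 1 > 1) := by omega
        rw [if_neg hgt, ih _ _ (by omega) hrest]
        have hd1 : decide (1 ≤ blank) = false := by simp; omega
        have hd2 : decide (1 ≤ blank + 1) = true := by simp; omega
        simp [collapseA, hb, hd1, h0]
    · rw [List.foldl_cons]
      simp only [hln, hb, if_neg, Bool.false_eq_true, not_false_iff]
      rw [ih _ _ (by omega) hrest]
      have hd : decide (1 ≤ (0 : Int)) = false := by simp
      simp [collapseA, hb]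

theorem collapseA_true_dropWhile (l : List String) :
    collapseA l true = collapseA (l.dropWhile (fun s => s == "")) false := by
  induction l with
  | nil => simp [collapseA]
  | cons ln rest ih => by_cases h : ln == "" <;> simp [collapseA, h, ih]

theorem collapseA_false_run (l : List String) :
    collapseA l false =
      l.takeWhile (fun s => s != "") ++ collapseA (l.dropWhile (fun s => s != "")) false := by
  induction l with
  | nil => simp [collapseA]
  | cons ln rest ih =>
    by_cases h : ln == ""
    · simp [collapseA, h, bne]
    · simp only [List.takeWhile_cons, List.dropWhile_cons, bne, h, Bool.not_false, if_true]
      simp [collapseA, h]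
      exact ih

theorem altSkipBlank_eq (lines : List String) (i : Nat) :
    altSkipBlank lines i = i + ((lines.drop i).takeWhile (fun s => s == "")).length := by
  by_cases h : i < lines.length
  · rw [altSkipBlank, dif_pos h]
    by_cases hb : lines[i] == ""
    · have ht : (lines.drop i).takeWhile (fun s => s == "") =
          lines[i] :: ((lines.drop (i + 1)).takeWhile (fun s => s == "")) := by
        rw [List.drop_eq_getElem_cons h, List.takeWhile_cons, if_pos hb]
      rw [if_pos hb, altSkipBlank_eq lines (i + 1), ht]
      simp only [List.length_cons]
      omega
    · have ht : (lines.drop i).takeWhile (fun s => s == "") = [] := by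
        rw [List.drop_eq_getElem_cons h, List.takeWhile_cons, if_neg hb]
      rw [if_neg hb, ht]
      simp
  · rw [altSkipBlank, dif_neg h, List.drop_eq_nil_of_le (by omega)]
    simp
termination_by lines.length - i

theorem altSkipNonblank_eq (lines : List String) (i : Nat) :
    altSkipNonblank lines i = i + ((lines.drop i).takeWhile (fun s => s != "")).length := by
  by_cases h : i < lines.length
  · rw [altSkipNonblank, dif_pos h]
    by_cases hb : lines[i] == ""
    · have hbf : (lines[i] != "") = false := by simp [bne, hb]
      have ht : (lines.drop i).takeWhile (fun s => s != "") = [] := by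
        rw [List.drop_eq_getElem_cons h, List.takeWhile_cons, if_neg (by simp [hbf])]
      rw [if_neg (by simp [hbf]), ht]
      simp
    · have hbne : (lines[i] != "") = true := by simp [bne, hb]
      have ht : (lines.drop i).takeWhile (fun s => s != "") =
          lines[i] :: ((lines.drop (i + 1)).takeWhile (fun s => s != "")) := by
        rw [List.drop_eq_getElem_cons h, List.takeWhile_cons, if_pos hbne]
      rw [if_pos hbne, altSkipNonblank_eq lines (i + 1), ht]
      simp only [List.length_cons]
      omega
  · rw [altSkipNonblank, dif_neg h, List.drop_eq_nil_of_le (by omega)]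
    simp
termination_by lines.length - i

theorem collapseA_eq_altLoop (n : Nat) (lines : List String) (i : Nat)
    (hn : lines.length - i ≤ n) :
    collapseA (lines.drop i) false = altLoop lines i := by
  induction n generalizing i with
  | zero =>
    rw [altLoop, dif_neg (by omega), List.drop_eq_nil_of_le (by omega)]
    simp [collapseA]
  | succ n ih =>
    by_cases h : i < lines.length
    · rw [altLoop, dif_pos h]
      by_cases hb : lines[i] == ""
      · rw [dif_pos hb, List.drop_eq_getElem_cons h]
        have heq : lines[i] = "" := by simpa using hb
        have hc : collapseA (lines[i] :: lines.drop (i + 1)) false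
            = lines[i] :: collapseA (lines.drop (i + 1)) true := by
          simp [collapseA, hb]
        rw [hc, heq]
        congr 1
        rw [collapseA_true_dropWhile]
        have hdrop : lines.drop (altSkipBlank lines (i + 1)) =
            (lines.drop (i + 1)).dropWhile (fun s => s == "") := by
          rw [altSkipBlank_eq, dropWhile_eq_drop, ← List.drop_drop]
        rw [← hdrop]
        exact ih (altSkipBlank lines (i + 1))
          (by have := le_altSkipBlank lines (i + 1); omega)
      · rw [dif_neg hb]
        show collapseA (lines.drop i) false =
          PySem.List.slice lines (some (i : Int)) (some ((altSkipNonblank lines i : Nat) : Int)) ++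
            altLoop lines (altSkipNonblank lines i)
        have hbne : (lines[i] != "") = true := by simp [bne, hb]
        have hj : i < altSkipNonblank lines i := by
          rw [altSkipNonblank_eq, List.drop_eq_getElem_cons h, List.takeWhile_cons,
            if_pos hbne]
          simp
        rw [collapseA_false_run]
        have hslice : PySem.List.slice lines (some (i : Int))
            (some ((altSkipNonblank lines i : Nat) : Int)) =
            (lines.drop i).takeWhile (fun s => s != "") := by
          rw [PySem.List.slice_toNat _ (by positivity) (by positivity)]
          simp only [Int.toNat_natCast]
          rw [altSkipNonblank_eq]
          simp only [Nat.add_sub_cancel_left]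
          exact (List.prefix_iff_eq_take.mp
            (List.takeWhile_prefix (l := lines.drop i) (fun s => s != ""))).symm
        rw [hslice]
        congr 1
        have hdrop : lines.drop (altSkipNonblank lines i) =
            (lines.drop i).dropWhile (fun s => s != "") := by
          rw [altSkipNonblank_eq, dropWhile_eq_drop, ← List.drop_drop]
        rw [← hdrop]
        exact ih _ (by omega)
    · rw [altLoop, dif_neg h, List.drop_eq_nil_of_le (by omega)]
      simp [collapseA]

-- ===== VERDICT (by name: the statement is the Claim_ definition above) =====
theorem normalize_python_py_spec : Claim_equal_normalize_python_py := by
  intro code _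
  unfold Spec_normalize_python_py normalize_python_py normalize_python_py_alt
  have hP : ∀ s ∈ (PySem.Str.splitlines code).map (fun ln => PySem.Str.rstrip ln),
      (PySem.Str.strip s == "") = (s == "") := by
    intro s hs
    rcases List.mem_map.mp hs with ⟨t, _, ht⟩
    rw [← ht]
    exact strip_rstrip_blank t
  have hout : (((PySem.Str.splitlines code).map (fun ln => PySem.Str.rstrip ln)).foldl
      (fun (acc : List String × Int) ln =>
        if PySem.Str.strip ln == "" then
          let blank := acc.2 + 1
          if blank > 1 then (acc.1, blank) else (acc.1 ++ [ln], blank)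
        else (acc.1 ++ [ln], 0)) ([], 0)).1
      = altLoop ((PySem.Str.splitlines code).map (fun ln => PySem.Str.rstrip ln)) 0 := by
    rw [foldA_eq_collapseA _ _ _ (by omega) hP]
    have hd : decide (1 ≤ (0 : Int)) = false := by decide
    rw [hd, List.nil_append]
    have hcoll := collapseA_eq_altLoop
      (((PySem.Str.splitlines code).map (fun ln => PySem.Str.rstrip ln)).length)
      ((PySem.Str.splitlines code).map (fun ln => PySem.Str.rstrip ln)) 0 (by omega)
    rw [List.drop_zero] at hcoll
    exact hcoll
  simp only []
  rw [hout]
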